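-- pv_equiv track=rewrite | github.com/mrzepka/iRacingConsistencyTracker | consistency_tracker.py | get_fastest_laptime_of_laps
-- ===== SOURCE A (Python) =====
-- def get_fastest_laptime_of_laps(laps):
--     positive_laps = []
--     fastest_laptime = 0
--     #don't count weird negative or impossible laptimes
--     for lap in laps:
--         if lap > 1:
--             positive_laps.append(lap)
--
--     if len(positive_laps) > 1:
--         fastest_laptime = min(positive_laps)
--     return fastest_laptime
-- ===== SOURCE B (Python) =====
-- def get_fastest_laptime_of_laps(laps):
--     count = 0
--     best = None
--     for lap in laps:
--         if lap > 1:
--             count += 1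
--             if best is None or lap < best:
--                 best = lap
--     return best if count > 1 else 0
-- ===== Notes on version B (the rewrite author's own statement) =====
-- stated objective: simpler
-- what changed: One fused pass keeping a count and a running minimum of laps > 1 instead of building a filtered list, checking its length and scanning it again with min().
import Mathlib
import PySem

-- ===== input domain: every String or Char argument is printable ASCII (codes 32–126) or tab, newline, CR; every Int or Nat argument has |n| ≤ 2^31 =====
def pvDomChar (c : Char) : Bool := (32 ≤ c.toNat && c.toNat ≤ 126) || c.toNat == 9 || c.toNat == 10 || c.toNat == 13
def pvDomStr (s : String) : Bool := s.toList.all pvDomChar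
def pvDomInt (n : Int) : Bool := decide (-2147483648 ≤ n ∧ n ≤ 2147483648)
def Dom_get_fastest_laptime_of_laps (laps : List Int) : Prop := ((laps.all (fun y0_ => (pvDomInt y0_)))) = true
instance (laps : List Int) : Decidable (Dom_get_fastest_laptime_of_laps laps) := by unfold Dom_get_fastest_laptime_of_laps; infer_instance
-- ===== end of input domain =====

-- B replaces A's filter-list + length-check + min() rescan by one fused pass over a count
-- and a running minimum (objective: simpler, O(1) extra space).

-- ===== PORT A =====
def get_fastest_laptime_of_laps (laps : List Int) : Int :=
  let positive_laps := laps.foldl (fun acc lap => if lap > 1 then acc ++ [lap] else acc) ([] : List Int)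
  if positive_laps.length > 1 then (PySem.List.min? positive_laps (fun x => x)).getD 0 else 0

-- ===== PORT B =====
def get_fastest_laptime_of_laps_alt (laps : List Int) : Int :=
  let st := laps.foldl
    (fun (st : Int × Option Int) lap =>
      if lap > 1 then
        (st.1 + 1,
         match st.2 with
         | none => some lap
         | some m => if lap < m then some lap else some m)
      else st)
    ((0 : Int), (none : Option Int))
  if st.1 > 1 then st.2.getD 0 else 0

-- ===== PRECONDITION & SPEC =====
def Spec_get_fastest_laptime_of_laps (laps : List Int) (out : Int) : Prop := out = get_fastest_laptime_of_laps_alt laps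
instance (laps : List Int) (out : Int) : Decidable (Spec_get_fastest_laptime_of_laps laps out) := by unfold Spec_get_fastest_laptime_of_laps; infer_instance

-- ===== CLAIM (what is proved, stated in full; the proofs are below) =====
def Claim_equal_get_fastest_laptime_of_laps : Prop := ∀ (laps : List Int), Dom_get_fastest_laptime_of_laps laps → Spec_get_fastest_laptime_of_laps laps (get_fastest_laptime_of_laps laps)

-- ===== LEMMAS AND PROOFS =====

-- one step of B's fold updates exactly (length, min?) of A's filtered list
lemma pv_min?_append_one (acc : List Int) (lap : Int) :
    PySem.List.min? (acc ++ [lap]) (fun x => x) =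
      (match PySem.List.min? acc (fun x => x) with
       | none => some lap
       | some m => if lap < m then some lap else some m) := by
  simp only [PySem.List.min?, List.foldl_append, List.foldl_cons, List.foldl_nil]
  split <;> rename_i h <;> simp [h]

-- invariant: B's fold state tracks (length, min?) of A's filtered accumulator
lemma pv_inv (laps : List Int) (acc : List Int) :
    laps.foldl
      (fun (st : Int × Option Int) lap =>
        if lap > 1 then
          (st.1 + 1,
           match st.2 with
           | none => some lap
           | some m => if lap < m then some lap else some m)
        else st)
      ((acc.length : Int), PySem.List.min? acc (fun x => x)) =
    (((laps.foldl (fun a lap => if lap > 1 then a ++ [lap] else a) acc).length : Int),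
     PySem.List.min? (laps.foldl (fun a lap => if lap > 1 then a ++ [lap] else a) acc) (fun x => x)) := by
  induction laps generalizing acc with
  | nil => simp
  | cons lap rest ih =>
    simp only [List.foldl_cons]
    by_cases h : lap > 1
    · simp only [h, if_pos]
      rw [← pv_min?_append_one]
      have hlen : ((acc ++ [lap]).length : Int) = (acc.length : Int) + 1 := by
        simp
      rw [← hlen]
      exact ih (acc ++ [lap])
    · simp only [h, if_false]
      exact ih acc

-- ===== VERDICT (by name: the statement is the Claim_ definition above) =====
theorem get_fastest_laptime_of_laps_spec : Claim_equal_get_fastest_laptime_of_laps := by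
  intro laps _
  unfold Spec_get_fastest_laptime_of_laps get_fastest_laptime_of_laps get_fastest_laptime_of_laps_alt
  have h := pv_inv laps []
  simp only [List.length_nil, Int.natCast_zero] at h
  have hmin : PySem.List.min? ([] : List Int) (fun x => x) = none := by
    simp [PySem.List.min?]
  rw [hmin] at h
  rw [h]
  simp only []
  by_cases hl : ((laps.foldl (fun a lap => if lap > 1 then a ++ [lap] else a) []).length : Int) > 1
  · simp [hl, show (laps.foldl (fun a lap => if lap > 1 then a ++ [lap] else a) []).length > 1 by exact_mod_cast hl]
  · simp [hl, show ¬ (laps.foldl (fun a lap => if lap > 1 then a ++ [lap] else a) []).length > 1 by exact_mod_cast hl]
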